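-- pv_equiv track=rewrite | github.com/ryandkuster/ngsComposer | tools/porifera.py | match_analyzer
-- ===== SOURCE A (Python) =====
-- def match_analyzer(focus, k):
--     '''
--     check focus list to see if estimated adapter position
--     is found a desired ratio of times
--     '''
--     z = max(focus, key=lambda x:len(focus[x]))
--     positions = focus[z]
--     pos_list = []
--     for i in positions:
--         pos_list.extend([j for j in range(i, (i+k))])
--     pos_list = set(pos_list)
--     return len(pos_list), z
-- ===== SOURCE B (Python) =====
-- def match_analyzer(focus, k):
--     best = None
--     for key in focus:
--         if best is None or len(focus[key]) > len(focus[best]):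
--             best = key
--     ps = sorted(set(focus[best]))
--     if k <= 0 or not ps:
--         return 0, best
--     return k + sum(min(k, b - a) for a, b in zip(ps, ps[1:])), best
-- ===== Notes on version B (the rewrite author's own statement) =====
-- stated objective: alternative
-- what changed: B finds the longest-list key by an explicit running-argmax loop instead of max(key=...), and replaces A's materialize-every-covered-position-into-a-set counting by summing k plus min(k, gap) over adjacent pairs of the sorted distinct starts (interval-union by a sorted sweep).
import Mathlib
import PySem

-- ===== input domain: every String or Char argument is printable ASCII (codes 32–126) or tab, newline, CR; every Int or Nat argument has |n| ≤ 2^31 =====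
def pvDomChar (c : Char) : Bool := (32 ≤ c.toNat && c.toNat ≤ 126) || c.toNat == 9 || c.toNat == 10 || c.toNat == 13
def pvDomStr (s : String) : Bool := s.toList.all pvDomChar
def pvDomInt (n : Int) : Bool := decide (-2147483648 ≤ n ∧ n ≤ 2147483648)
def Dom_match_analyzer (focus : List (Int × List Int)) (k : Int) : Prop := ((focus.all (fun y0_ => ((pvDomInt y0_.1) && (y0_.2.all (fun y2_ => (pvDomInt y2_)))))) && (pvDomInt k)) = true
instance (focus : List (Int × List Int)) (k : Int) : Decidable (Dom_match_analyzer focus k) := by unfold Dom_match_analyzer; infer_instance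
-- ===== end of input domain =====

-- B finds the longest-list key by an explicit running-argmax loop instead of max(key=...) and
-- counts the union of the length-k windows by summing k plus min(k, gap) over adjacent pairs of
-- the sorted distinct starts, instead of materializing every covered position into a set.

-- ===== PORT A =====
-- z = max(focus, key=lambda x: len(focus[x]))   (ValueError on empty dict → Pre_)
def match_analyzer (focus : List (Int × List Int)) (k : Int) : Int × Int :=
  match PySem.List.max? ((PySem.Dict.mk focus).keys)
      (fun x => PySem.List.len ((PySem.Dict.mk focus).getD x [])) with
  | none => (0, 0)   -- unreachable under Pre_ (Python raises ValueError)
  | some z =>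
    let positions := (PySem.Dict.mk focus).getD z []
    -- for i in positions: pos_list.extend(range(i, i+k))
    let posList := positions.foldl (fun acc i => acc ++ PySem.List.pyRange i (i + k) 1) []
    -- pos_list = set(pos_list); return len(pos_list), z
    (PySem.Set.len (PySem.Set.ofList posList), z)

-- ===== PORT B =====
-- for key in focus: if best is None or len(focus[key]) > len(focus[best]): best = key
def pvArgmax (d : PySem.Dict Int (List Int)) : Option Int → List Int → Option Int
  | best, [] => best
  | best, key :: rest =>
      pvArgmax d
        (match best with
         | none => some key
         | some b => if (d.getD b []).length < (d.getD key []).length then some key else best)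
        rest

def match_analyzer_alt (focus : List (Int × List Int)) (k : Int) : Int × Int :=
  match pvArgmax (PySem.Dict.mk focus) none ((PySem.Dict.mk focus).keys) with
  | none => (0, 0)   -- unreachable under Pre_ (Python raises KeyError on focus[None])
  | some best =>
    -- ps = sorted(set(focus[best]))
    let ps := PySem.List.sorted (PySem.Set.ofList ((PySem.Dict.mk focus).getD best [])) (fun x => x) false
    if k ≤ 0 ∨ ps = [] then (0, best)
    else (k + ((ps.zip ps.tail).map (fun ab => min k (ab.2 - ab.1))).sum, best)

-- ===== PRECONDITION & SPEC =====
-- Pre_ excludes only the empty dict, on which Python A raises ValueError (max of empty) and B raises KeyError.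
def Pre_match_analyzer (focus : List (Int × List Int)) (k : Int) : Prop := focus ≠ []
instance (focus : List (Int × List Int)) (k : Int) : Decidable (Pre_match_analyzer focus k) := by unfold Pre_match_analyzer; infer_instance
def pvWitness_match_analyzer : (List (Int × List Int)) × Int := ([(0, [0, 3])], 2)

def Spec_match_analyzer (focus : List (Int × List Int)) (k : Int) (out : Int × Int) : Prop := out = match_analyzer_alt focus k
instance (focus : List (Int × List Int)) (k : Int) (out : Int × Int) : Decidable (Spec_match_analyzer focus k out) := by unfold Spec_match_analyzer; infer_instance

-- ===== CLAIM (what is proved, stated in full; the proofs are below) =====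
def Claim_equal_match_analyzer : Prop := ∀ (focus : List (Int × List Int)) (k : Int), Dom_match_analyzer focus k → Pre_match_analyzer focus k → Spec_match_analyzer focus k (match_analyzer focus k)

-- ===== LEMMAS AND PROOFS =====

-- B's explicit argmax loop computes exactly A's max(key=len ∘ lookup) fold.
lemma pvArgmax_eq_foldl (d : PySem.Dict Int (List Int)) :
    ∀ (l : List Int) (best : Option Int),
      pvArgmax d best l =
        l.foldl
          (fun acc x =>
            match acc with
            | none => some x
            | some m =>
              if PySem.List.len (d.getD m []) < PySem.List.len (d.getD x []) then some x
              else some m)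
          best := by
  intro l
  induction l with
  | nil => intro best; rfl
  | cons key rest ih =>
    intro best
    cases best with
    | none => simp [pvArgmax, ih]
    | some b =>
      simp only [pvArgmax, List.foldl_cons, ih, PySem.List.len, Nat.cast_lt]

-- pvU l k = union of the half-open intervals [p, p+k) for p in l, as a Finset
noncomputable def pvU (l : List Int) (k : Int) : Finset Int :=
  l.foldr (fun p acc => Finset.Ico p (p + k) ∪ acc) ∅

lemma mem_pvU {l : List Int} {k x : Int} : x ∈ pvU l k ↔ ∃ p ∈ l, p ≤ x ∧ x < p + k := by
  induction l with
  | nil => simp [pvU]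
  | cons h t ih =>
    simp only [pvU, List.foldr, Finset.mem_union, Finset.mem_Ico, List.mem_cons] at ih ⊢
    rw [ih]; constructor
    · rintro (⟨h1, h2⟩ | ⟨p, hp, h1, h2⟩)
      · exact ⟨h, Or.inl rfl, h1, h2⟩
      · exact ⟨p, Or.inr hp, h1, h2⟩
    · rintro ⟨p, (rfl | hp), h1, h2⟩
      · exact Or.inl ⟨h1, h2⟩
      · exact Or.inr ⟨p, hp, h1, h2⟩

lemma pvU_eq_of_mem_iff {l₁ l₂ : List Int} (k : Int) (h : ∀ x, x ∈ l₁ ↔ x ∈ l₂) :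
    pvU l₁ k = pvU l₂ k := by
  ext x; simp only [mem_pvU]
  constructor <;> rintro ⟨p, hp, h1, h2⟩
  · exact ⟨p, (h p).1 hp, h1, h2⟩
  · exact ⟨p, (h p).2 hp, h1, h2⟩

-- adding the leftmost interval [p, p+k) in front of a union whose minimum start is q > p
lemma pv_card_front {k p q : Int} {U : Finset Int} (hk : 0 < k) (hpq : p < q)
    (hq : Finset.Ico q (q + k) ⊆ U) (hmin : ∀ x ∈ U, q ≤ x) :
    ((Finset.Ico p (p + k) ∪ U).card : Int) = min k (q - p) + U.card := by
  by_cases hcase : p + k ≤ q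
  · have hdisj : Disjoint (Finset.Ico p (p + k)) U := by
      rw [Finset.disjoint_left]
      intro x hx hx'
      simp only [Finset.mem_Ico] at hx
      have := hmin x hx'
      omega
    rw [Finset.card_union_of_disjoint hdisj, Int.card_Ico]
    push_cast
    omega
  · have heq : Finset.Ico p (p + k) ∪ U = Finset.Ico p q ∪ U := by
      ext x
      simp only [Finset.mem_union, Finset.mem_Ico]
      constructor
      · rintro (⟨h1, h2⟩ | hx)
        · by_cases hx2 : x < q
          · exact Or.inl ⟨h1, hx2⟩
          · exact Or.inr (hq (by simp only [Finset.mem_Ico]; omega))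
        · exact Or.inr hx
      · rintro (⟨h1, h2⟩ | hx)
        · exact Or.inl ⟨h1, by omega⟩
        · exact Or.inr hx
    have hdisj : Disjoint (Finset.Ico p q) U := by
      rw [Finset.disjoint_left]
      intro x hx hx'
      simp only [Finset.mem_Ico] at hx
      have := hmin x hx'
      omega
    rw [heq, Finset.card_union_of_disjoint hdisj, Int.card_Ico]
    push_cast
    omega

-- B's adjacent-gap sum computes the cardinality of the interval union, on strictly sorted input
lemma pv_sweep {k : Int} (hk : 0 < k) :
    ∀ (rest : List Int) (p : Int), (p :: rest).Pairwise (· < ·) →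
      k + (((p :: rest).zip rest).map (fun ab => min k (ab.2 - ab.1))).sum
        = ((pvU (p :: rest) k).card : Int) := by
  intro rest
  induction rest with
  | nil =>
    intro p _
    simp [pvU, Int.card_Ico]
    omega
  | cons q rest ih =>
    intro p hpair
    have hpq : p < q := (List.pairwise_cons.1 hpair).1 q (by simp)
    have htail : (q :: rest).Pairwise (· < ·) := (List.pairwise_cons.1 hpair).2
    have hqmin : ∀ x ∈ pvU (q :: rest) k, q ≤ x := by
      intro x hx
      obtain ⟨r, hr, h1, _⟩ := mem_pvU.1 hx
      rcases List.mem_cons.1 hr with rfl | hr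
      · omega
      · have := (List.pairwise_cons.1 htail).1 r hr
        omega
    have hsub : Finset.Ico q (q + k) ⊆ pvU (q :: rest) k := by
      intro x hx
      simp only [Finset.mem_Ico] at hx
      exact mem_pvU.2 ⟨q, by simp, hx.1, hx.2⟩
    have hstep : pvU (p :: q :: rest) k = Finset.Ico p (p + k) ∪ pvU (q :: rest) k := rfl
    rw [hstep, pv_card_front hk hpq hsub hqmin, ← ih q htail]
    simp only [List.zip_cons_cons, List.map_cons, List.sum_cons]
    ring

-- the flattened range list of A covers exactly the interval union
lemma pv_toFinset (positions : List Int) (k : Int) :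
    (positions.foldl (fun acc i => acc ++ PySem.List.pyRange i (i + k) 1) []).toFinset
      = pvU positions k := by
  ext x
  rw [PySem.List.foldl_append_eq_flatMap]
  simp only [List.mem_toFinset, List.nil_append, List.mem_flatMap, PySem.List.mem_pyRange_one,
    mem_pvU]

lemma pv_ofList_len (L : List Int) :
    PySem.Set.len (PySem.Set.ofList L) = (L.toFinset.card : Int) := by
  have h1 : (PySem.Set.ofList L).toFinset = L.toFinset := by
    ext x; simp [List.mem_toFinset, PySem.Set.mem_ofList]
  have h2 := List.toFinset_card_of_nodup (PySem.Set.nodup_ofList (xs := L))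
  simp only [PySem.Set.len]
  rw [← h2, h1]

theorem match_analyzer_spec : Claim_equal_match_analyzer := by
  intro focus k _ hpre
  unfold Spec_match_analyzer match_analyzer match_analyzer_alt
  have hhead : pvArgmax (PySem.Dict.mk focus) none ((PySem.Dict.mk focus).keys)
      = PySem.List.max? ((PySem.Dict.mk focus).keys)
          (fun x => PySem.List.len ((PySem.Dict.mk focus).getD x [])) := by
    rw [pvArgmax_eq_foldl]
    simp only [PySem.List.max?]
    congr 1
    funext acc x
    cases acc <;> rfl
  rw [hhead]
  cases hmax : PySem.List.max? ((PySem.Dict.mk focus).keys)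
      (fun x => PySem.List.len ((PySem.Dict.mk focus).getD x [])) with
  | none => rfl
  | some z =>
    simp only
    set positions := (PySem.Dict.mk focus).getD z [] with hpos
    set ps := PySem.List.sorted (PySem.Set.ofList positions) (fun x => x) false with hs
    have hmem : ∀ x, x ∈ positions ↔ x ∈ ps := by
      intro x
      rw [hs, PySem.List.mem_sorted, PySem.Set.mem_ofList]
    have hA : PySem.Set.len (PySem.Set.ofList
        (positions.foldl (fun acc i => acc ++ PySem.List.pyRange i (i + k) 1) []))
        = ((pvU ps k).card : Int) := by
      rw [pv_ofList_len, pv_toFinset, pvU_eq_of_mem_iff k hmem]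
    by_cases hk : k ≤ 0
    · rw [if_pos (Or.inl hk)]
      have hnil : positions.foldl (fun acc i => acc ++ PySem.List.pyRange i (i + k) 1) [] = [] := by
        rw [PySem.List.foldl_append_eq_flatMap, List.nil_append, List.flatMap_eq_nil_iff]
        intro i _
        exact PySem.List.pyRange_one_eq_nil (by omega)
      rw [hnil]
      simp [PySem.Set.len, PySem.Set.ofList]
    · rw [not_le] at hk
      cases hps : ps with
      | nil =>
        have hpnil : positions = [] := by
          rcases hpn : positions with _ | ⟨a, t⟩
          · rfl
          · exfalso
            have := (hmem a).1 (by rw [hpn]; simp)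
            rw [hps] at this
            simp at this
        rw [if_pos (Or.inr rfl), hpnil]
        simp [PySem.Set.len, PySem.Set.ofList]
      | cons p rest =>
        rw [if_neg (by
          rintro (h | h)
          · omega
          · exact (List.cons_ne_nil p rest) h)]
        have hsp : ps.Pairwise (· < ·) := by
          rw [hs]; exact PySem.List.sorted_ofList_pairwise_lt positions
        rw [hps] at hsp hA
        have hsweep := pv_sweep hk rest p hsp
        rw [hA, ← hsweep]
        simp
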